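-- pv_equiv track=rewrite | github.com/hahyeyoung/python | Programmers/level0/외계어 사전.py | solution
-- ===== SOURCE A (Python) =====
-- def solution(spell, dic):
--     answer = 2
--     word = ''
--     spell = ''.join(sorted(spell))
--
--     for i in dic:
--         i = ''.join(sorted(i))
--         if i == spell:
--             answer = 1
--     return answer
-- ===== SOURCE B (Python) =====
-- def solution(spell, dic):
--     letters = [c for w in spell for c in w]
--     n = len(letters)
--
--     def matches(word):
--         chars = list(word)
--         return len(chars) == n and all(chars.count(c) == letters.count(c) for c in chars)
--
--     return 1 if any(matches(w) for w in dic) else 2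
-- ===== Notes on version B (the rewrite author's own statement) =====
-- stated objective: alternative
-- what changed: Replaced the sort-both-sides canonical-form comparison with a frequency check: B counts character occurrences of each word against the concatenated spell letters instead of building sorted strings.
-- intended difference: When spell contains a multi-character string whose string-sorted concatenation is not character-sorted and some dic word is an anagram of the concatenated letters, A returns 2 (its target string can never equal a character-sorted word) while B returns 1; B's answer is the intended one since the task asks whether a word is an anagram of the spell letters. — e.g. on solution(["ba"], ["ab"]): A returns 2, B returns 1
import Mathlib
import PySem

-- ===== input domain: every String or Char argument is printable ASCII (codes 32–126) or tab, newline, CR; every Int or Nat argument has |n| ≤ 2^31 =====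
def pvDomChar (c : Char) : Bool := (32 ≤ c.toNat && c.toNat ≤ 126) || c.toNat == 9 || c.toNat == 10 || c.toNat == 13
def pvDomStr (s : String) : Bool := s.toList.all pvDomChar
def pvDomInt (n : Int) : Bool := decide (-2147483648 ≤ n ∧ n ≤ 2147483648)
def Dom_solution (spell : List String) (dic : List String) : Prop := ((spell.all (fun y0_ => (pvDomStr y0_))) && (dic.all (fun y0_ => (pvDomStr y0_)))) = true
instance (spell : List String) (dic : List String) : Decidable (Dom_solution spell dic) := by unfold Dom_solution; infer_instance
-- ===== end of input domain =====

-- B replaces A's sort-both-sides canonical-string comparison by a per-character frequency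
-- check of each word against the concatenated spell letters (alternative algorithm, not faster).

-- ===== PORT A =====
-- ''.join(sorted(i)) for a string i: sorted(i) is the list of i's characters in sorted order
-- (as 1-char strings), which ''.join reassembles; ported exactly as join of the singletons.
def solution (spell : List String) (dic : List String) : Int :=
  let spell' : String := PySem.Str.join "" (PySem.List.sorted spell (fun x => x))
  dic.foldl (fun answer i =>
    let i' : String :=
      PySem.Str.join "" ((PySem.List.sorted i.toList (fun c => c)).map (fun c => String.ofList [c]))
    if i' = spell' then 1 else answer) 2

-- ===== PORT B =====
def altMatches (letters : List Char) (n : Nat) (word : String) : Bool :=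
  let chars := word.toList
  chars.length == n && chars.all (fun c => chars.count c == letters.count c)

def solution_alt (spell : List String) (dic : List String) : Int :=
  let letters : List Char := spell.flatMap (fun w => w.toList)
  let n := letters.length
  if dic.any (fun w => altMatches letters n w) then 1 else 2

-- ===== PRECONDITION & SPEC =====
-- On spells containing multi-character strings whose string-sorted concatenation is not
-- character-sorted while some dic word IS an anagram of the concatenated letters, A returns 2
-- (its target string can never equal a character-sorted word) but B returns 1; B's answer is the
-- intended one, since the task asks whether a dictionary word is an anagram of the spell letters.
def D_solution (spell : List String) (dic : List String) : Prop :=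
  ¬ List.Pairwise (· ≤ ·) (PySem.Str.join "" (PySem.List.sorted spell (fun x => x))).toList
  ∧ ∃ w ∈ dic, w.toList.Perm (spell.flatMap (fun s => s.toList))
instance (spell : List String) (dic : List String) : Decidable (D_solution spell dic) := by
  unfold D_solution; infer_instance

def Spec_solution (spell : List String) (dic : List String) (out : Int) : Prop :=
  ¬ D_solution spell dic → out = solution_alt spell dic
instance (spell : List String) (dic : List String) (out : Int) : Decidable (Spec_solution spell dic out) := by
  unfold Spec_solution; infer_instance

def pvDiffWitness_solution : List String × List String := (["ba"], ["ab"])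
def pvDiffWitnessOut_solution : Int × Int := (2, 1)

-- ===== CLAIM (what is proved, stated in full; the proofs are below) =====
def Claim_unchanged_solution : Prop := ∀ (spell : List String) (dic : List String), Dom_solution spell dic → Spec_solution spell dic (solution spell dic)
def Claim_changed_solution : Prop := Dom_solution (pvDiffWitness_solution.1) (pvDiffWitness_solution.2) ∧ D_solution (pvDiffWitness_solution.1) (pvDiffWitness_solution.2) ∧ solution (pvDiffWitness_solution.1) (pvDiffWitness_solution.2) = pvDiffWitnessOut_solution.1 ∧ solution_alt (pvDiffWitness_solution.1) (pvDiffWitness_solution.2) = pvDiffWitnessOut_solution.2 ∧ pvDiffWitnessOut_solution.1 ≠ pvDiffWitnessOut_solution.2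
def Claim_exact_solution : Prop := ∀ (spell : List String) (dic : List String), Dom_solution spell dic → D_solution spell dic → solution spell dic ≠ solution_alt spell dic

-- ===== LEMMAS AND PROOFS =====

-- the characters of A's target string
def pvT (spell : List String) : List Char :=
  (PySem.Str.join "" (PySem.List.sorted spell (fun x => x))).toList

-- the characters of A's canonical form of a word
lemma pv_canon_toList (w : String) :
    (PySem.Str.join "" ((PySem.List.sorted w.toList (fun c => c)).map (fun c => String.ofList [c]))).toList
      = PySem.List.sorted w.toList (fun c => c) := by
  rw [PySem.Str.toList_join]
  have h : (List.map String.toList ((PySem.List.sorted w.toList (fun c => c)).map (fun c => String.ofList [c])))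
      = (PySem.List.sorted w.toList (fun c => c)).map (fun c => [c]) := by
    simp [List.map_map, Function.comp, String.toList_ofList]
  rw [h]
  exact PySem.Chars.join_nil_singletons (PySem.List.sorted w.toList (fun c => c))

-- A's loop returns 1 iff some word's canonical form equals the target, else 2
lemma pv_foldl_eq (spell' : String) (l : List String) (a : Int) :
    l.foldl (fun answer i =>
        if PySem.Str.join "" ((PySem.List.sorted i.toList (fun c => c)).map (fun c => String.ofList [c])) = spell'
        then 1 else answer) a
      = if l.any (fun i =>
          PySem.Str.join "" ((PySem.List.sorted i.toList (fun c => c)).map (fun c => String.ofList [c])) = spell')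
        then 1 else a := by
  induction l generalizing a with
  | nil => simp
  | cons x xs ih =>
      simp only [List.foldl_cons, List.any_cons, ih]
      by_cases hx : PySem.Str.join "" ((PySem.List.sorted x.toList (fun c => c)).map (fun c => String.ofList [c])) = spell' <;>
        by_cases hxs : xs.any (fun i =>
          PySem.Str.join "" ((PySem.List.sorted i.toList (fun c => c)).map (fun c => String.ofList [c])) = spell') = true <;>
        simp [hx, hxs]

-- the target is a permutation of the concatenated spell letters
lemma pvT_perm (spell : List String) : (pvT spell).Perm (spell.flatMap (fun s => s.toList)) := by
  unfold pvT
  rw [PySem.Str.toList_join]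
  have hj : ∀ (ls : List (List Char)), PySem.Chars.join ([] : List Char) ls = ls.flatten := by
    intro ls
    induction ls with
    | nil => rfl
    | cons y ys ihy =>
        cases ys with
        | nil => simp [PySem.Chars.join, List.intercalate]
        | cons z zs => simp_all [PySem.Chars.join_cons_cons]
  have h1 : (PySem.List.sorted spell (fun x => x)).Perm spell :=
    PySem.List.sorted_perm spell (fun x => x) false
  have h3 : (List.map String.toList (PySem.List.sorted spell (fun x => x))).flatten.Perm
      (List.map String.toList spell).flatten := (h1.map String.toList).flatten
  have h4 : (List.map String.toList spell).flatten = spell.flatMap (fun s => s.toList) :=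
    (List.flatMap_def).symm
  have he : ("" : String).toList = ([] : List Char) := rfl
  rw [he, hj]
  exact h4 ▸ h3

-- B's per-word test is exactly "anagram of letters"
lemma pv_altMatches_iff (letters : List Char) (w : String) :
    altMatches letters letters.length w = true ↔ w.toList.Perm letters := by
  unfold altMatches
  simp only [Bool.and_eq_true, beq_iff_eq, List.all_eq_true]
  constructor
  · rintro ⟨hlen, hcnt⟩
    have hle : (↑w.toList : Multiset Char) ≤ (↑letters : Multiset Char) := by
      rw [Multiset.le_iff_count]
      intro c
      by_cases hc : c ∈ w.toList
      · simp [List.count_eq_countP] at hcnt ⊢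
        have := hcnt c hc
        simp_all
      · have : w.toList.count c = 0 := List.count_eq_zero.2 hc
        simp [Multiset.coe_count, this]
    have heq : (↑w.toList : Multiset Char) = (↑letters : Multiset Char) :=
      Multiset.eq_of_le_of_card_le hle (by simp [hlen])
    exact Quotient.exact heq
  · intro hp
    exact ⟨hp.length_eq, fun c _ => by rw [hp.count_eq]⟩

-- A's canonical-form test, when the target is character-sorted, is also "anagram of target"
lemma pv_canon_eq_iff_perm (spell : List String) (w : String)
    (hs : List.Pairwise (· ≤ ·) (pvT spell)) :
    (PySem.Str.join "" ((PySem.List.sorted w.toList (fun c => c)).map (fun c => String.ofList [c]))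
        = PySem.Str.join "" (PySem.List.sorted spell (fun x => x)))
      ↔ w.toList.Perm (pvT spell) := by
  constructor
  · intro h
    have hl : (PySem.List.sorted w.toList (fun c => c)) = pvT spell := by
      have := congrArg String.toList h
      rw [pv_canon_toList] at this
      exact this
    have hperm : (PySem.List.sorted w.toList (fun c => c)).Perm w.toList :=
      PySem.List.sorted_perm w.toList (fun c => c) false
    exact (hl ▸ hperm).symm
  · intro hp
    have : (PySem.List.sorted w.toList (fun c => c)) = pvT spell :=
      PySem.List.sorted_id_eq_of_perm_of_pairwise w.toList (pvT spell) hp.symm hs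
    apply String.toList_inj.mp
    rw [pv_canon_toList, this]
    rfl

-- A's canonical form never equals a target that is not character-sorted
lemma pv_canon_ne_of_not_sorted (spell : List String) (w : String)
    (hs : ¬ List.Pairwise (· ≤ ·) (pvT spell)) :
    ¬ (PySem.Str.join "" ((PySem.List.sorted w.toList (fun c => c)).map (fun c => String.ofList [c]))
        = PySem.Str.join "" (PySem.List.sorted spell (fun x => x))) := by
  intro h
  apply hs
  have := congrArg String.toList h
  rw [pv_canon_toList] at this
  rw [show pvT spell = (PySem.Str.join "" (PySem.List.sorted spell (fun x => x))).toList from rfl, ← this]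
  exact PySem.List.sorted_pairwise w.toList (fun c => c)

-- ===== VERDICT (by name: the statement is the Claim_ definition above) =====
theorem solution_spec : Claim_unchanged_solution := by
  intro spell dic _ hnd
  show solution spell dic = solution_alt spell dic
  simp only [solution, solution_alt]
  rw [pv_foldl_eq]
  have hcond :
      (dic.any (fun i =>
          PySem.Str.join "" ((PySem.List.sorted i.toList (fun c => c)).map (fun c => String.ofList [c]))
            = PySem.Str.join "" (PySem.List.sorted spell (fun x => x))))
        = (dic.any (fun w =>
            altMatches (spell.flatMap (fun w => w.toList)) (spell.flatMap (fun w => w.toList)).length w)) := by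
    apply Bool.eq_iff_iff.mpr
    simp only [List.any_eq_true, decide_eq_true_eq]
    by_cases hs : List.Pairwise (· ≤ ·) (pvT spell)
    · constructor
      · rintro ⟨i, hi, heq⟩
        refine ⟨i, hi, ?_⟩
        rw [pv_altMatches_iff]
        exact ((pv_canon_eq_iff_perm spell i hs).mp heq).trans (pvT_perm spell)
      · rintro ⟨i, hi, hm⟩
        refine ⟨i, hi, ?_⟩
        rw [pv_canon_eq_iff_perm spell i hs]
        exact ((pv_altMatches_iff _ i).mp hm).trans (pvT_perm spell).symm
    · have hno : ¬ ∃ w ∈ dic, w.toList.Perm (spell.flatMap (fun s => s.toList)) := by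
        intro hex
        exact hnd ⟨hs, hex⟩
      constructor
      · rintro ⟨i, hi, heq⟩
        exact absurd heq (pv_canon_ne_of_not_sorted spell i hs)
      · rintro ⟨i, hi, hm⟩
        exact absurd ⟨i, hi, (pv_altMatches_iff _ i).mp hm⟩ hno
  rw [hcond]

theorem solution_changed : Claim_changed_solution := by
  unfold Claim_changed_solution; decide

theorem solution_tight : Claim_exact_solution := by
  intro spell dic _ hd
  obtain ⟨hs, i0, hi0, hp0⟩ := hd
  have hA : solution spell dic = 2 := by
    simp only [solution]
    rw [pv_foldl_eq]
    have : (dic.any (fun i =>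
        PySem.Str.join "" ((PySem.List.sorted i.toList (fun c => c)).map (fun c => String.ofList [c]))
          = PySem.Str.join "" (PySem.List.sorted spell (fun x => x)))) = false := by
      simp only [List.any_eq_false, decide_eq_true_eq]
      intro i _
      exact pv_canon_ne_of_not_sorted spell i hs
    rw [this]
    rfl
  have hB : solution_alt spell dic = 1 := by
    simp only [solution_alt]
    have : (dic.any (fun w =>
        altMatches (spell.flatMap (fun w => w.toList)) (spell.flatMap (fun w => w.toList)).length w)) = true := by
      simp only [List.any_eq_true]
      exact ⟨i0, hi0, (pv_altMatches_iff _ i0).mpr hp0⟩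
    rw [this]
    rfl
  rw [hA, hB]
  decide
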